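-- pv_equiv track=rewrite | github.com/LymanSong/suwon_bus_stop_competetion | code/code_seq_change2 (1).py | get_pair_stop
-- ===== SOURCE A (Python) =====
-- def get_pair_stop(g1tog2, stop_idx):
--     for v in g1tog2.values():
--         if v[0] == stop_idx:
--             return v[1]
--         elif v[1] == stop_idx:
--             return v[0]
--         else:
--             continue
-- ===== SOURCE B (Python) =====
-- def get_pair_stop(g1tog2, stop_idx):
--     partner = {}
--     for v in g1tog2.values():
--         partner.setdefault(v[0], v[1])
--         partner.setdefault(v[1], v[0])
--     return partner.get(stop_idx)
-- ===== Notes on version B (the rewrite author's own statement) =====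
-- stated objective: idiomatic
-- what changed: Replaces the scan-until-match loop over pair values by building a partner dictionary once (setdefault on both endpoints so the first pair containing a value wins) followed by a single dict lookup.
-- outside the precondition, e.g. on get_pair_stop({1: [5, 7], 2: []}, 5): A returns 7, B raises IndexError
import Mathlib
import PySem

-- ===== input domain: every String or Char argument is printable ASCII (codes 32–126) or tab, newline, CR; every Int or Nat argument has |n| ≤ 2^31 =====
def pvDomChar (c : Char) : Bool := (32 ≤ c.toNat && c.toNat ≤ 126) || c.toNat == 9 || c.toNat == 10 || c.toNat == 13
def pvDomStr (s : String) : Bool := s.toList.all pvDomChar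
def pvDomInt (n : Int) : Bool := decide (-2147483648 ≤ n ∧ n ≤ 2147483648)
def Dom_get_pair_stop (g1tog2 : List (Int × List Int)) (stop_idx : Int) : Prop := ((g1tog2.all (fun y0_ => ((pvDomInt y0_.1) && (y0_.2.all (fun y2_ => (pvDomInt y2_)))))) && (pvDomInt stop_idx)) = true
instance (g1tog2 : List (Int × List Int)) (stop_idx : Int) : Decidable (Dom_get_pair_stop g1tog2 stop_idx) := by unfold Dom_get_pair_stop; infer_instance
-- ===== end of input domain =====

-- B replaces A's scan-until-match over the pair values by building a partner dictionary once
-- (setdefault on both endpoints, so the first pair containing a value wins) and doing one lookup (idiomatic).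


-- ===== PORT A =====
-- the for-loop over d.values() with early return: structural recursion over the value lists;
-- v[0] / v[1] via PySem.List.pyGet? (none = IndexError, excluded by Pre_)
def get_pair_stop (g1tog2 : List (Int × List Int)) (stop_idx : Int) : Option Int :=
  match g1tog2 with
  | [] => none
  | (_, v) :: rest =>
    if PySem.List.pyGet? v 0 = some stop_idx then PySem.List.pyGet? v 1
    else if PySem.List.pyGet? v 1 = some stop_idx then PySem.List.pyGet? v 0
    else get_pair_stop rest stop_idx

-- ===== PORT B =====
-- partner.setdefault(k, w): insert only if the key is absent
def pvSetdefault (d : PySem.Dict Int Int) (k w : Int) : PySem.Dict Int Int :=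
  match d.get? k with
  | some _ => d
  | none => d.insert k w

-- one iteration of B's dict-building loop (v[0]/v[1] via pyGet?; none = IndexError, outside Pre_)
def pvAddPair (d : PySem.Dict Int Int) (v : List Int) : PySem.Dict Int Int :=
  match PySem.List.pyGet? v 0, PySem.List.pyGet? v 1 with
  | some a, some b => pvSetdefault (pvSetdefault d a b) b a
  | _, _ => d

def get_pair_stop_alt (g1tog2 : List (Int × List Int)) (stop_idx : Int) : Option Int :=
  let partner := g1tog2.foldl (fun d p => pvAddPair d p.2) PySem.Dict.empty
  partner.get? stop_idx

-- ===== PRECONDITION & SPEC =====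
-- Pre_ excludes inputs containing a value list of length < 2: on those A raises IndexError at v[0]
-- or v[1] (except when an earlier pair already matched and A returned — see the cite in claim.json).
def Pre_get_pair_stop (g1tog2 : List (Int × List Int)) (stop_idx : Int) : Prop :=
  ∀ p ∈ g1tog2, 2 ≤ p.2.length
instance (g1tog2 : List (Int × List Int)) (stop_idx : Int) : Decidable (Pre_get_pair_stop g1tog2 stop_idx) := by unfold Pre_get_pair_stop; infer_instance
def pvWitness_get_pair_stop : (List (Int × List Int)) × Int := ([(1, [5, 7]), (2, [3, 5])], 3)

def Spec_get_pair_stop (g1tog2 : List (Int × List Int)) (stop_idx : Int) (out : Option Int) : Prop := out = get_pair_stop_alt g1tog2 stop_idx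
instance (g1tog2 : List (Int × List Int)) (stop_idx : Int) (out : Option Int) : Decidable (Spec_get_pair_stop g1tog2 stop_idx out) := by unfold Spec_get_pair_stop; infer_instance

-- ===== CLAIM (what is proved, stated in full; the proofs are below) =====
def Claim_equal_get_pair_stop : Prop := ∀ (g1tog2 : List (Int × List Int)) (stop_idx : Int), Dom_get_pair_stop g1tog2 stop_idx → Pre_get_pair_stop g1tog2 stop_idx → Spec_get_pair_stop g1tog2 stop_idx (get_pair_stop g1tog2 stop_idx)

-- ===== LEMMAS AND PROOFS =====

-- setdefault never changes an existing binding
theorem pvSetdefault_some {d : PySem.Dict Int Int} {s x : Int} (k w : Int)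
    (h : d.get? s = some x) : (pvSetdefault d k w).get? s = some x := by
  unfold pvSetdefault
  cases hk : d.get? k with
  | some _ => exact h
  | none =>
    by_cases hs : s = k
    · subst hs; rw [h] at hk; cases hk
    · rw [PySem.Dict.get?_insert_of_ne d w hs]; exact h

-- setdefault at a different key does not change the lookup at s
theorem pvSetdefault_ne {s : Int} (d : PySem.Dict Int Int) {k : Int} (w : Int)
    (hne : s ≠ k) : (pvSetdefault d k w).get? s = d.get? s := by
  unfold pvSetdefault
  cases d.get? k with
  | some _ => rfl
  | none => exact PySem.Dict.get?_insert_of_ne d w hne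

-- setdefault on an absent key binds it
theorem pvSetdefault_hit (d : PySem.Dict Int Int) (k w : Int)
    (h : d.get? k = none) : (pvSetdefault d k w).get? k = some w := by
  unfold pvSetdefault; rw [h]; exact PySem.Dict.get?_insert_self d k w

-- the whole fold preserves an existing binding
theorem pvBuild_some {s x : Int} (l : List (Int × List Int)) (d : PySem.Dict Int Int)
    (h : d.get? s = some x) :
    (l.foldl (fun d p => pvAddPair d p.2) d).get? s = some x := by
  induction l generalizing d with
  | nil => exact h
  | cons p rest ih =>
    refine ih _ ?_
    show (pvAddPair d p.2).get? s = some x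
    unfold pvAddPair
    cases h0 : PySem.List.pyGet? p.2 0 with
    | none => exact h
    | some a =>
      cases h1 : PySem.List.pyGet? p.2 1 with
      | none => exact h
      | some b => exact pvSetdefault_some _ _ (pvSetdefault_some _ _ h)

-- main invariant: if s is not yet bound in d, the built table's answer at s is A's scan answer
theorem pvBuild_eq_scan (s : Int) (l : List (Int × List Int)) (d : PySem.Dict Int Int)
    (hpre : ∀ p ∈ l, 2 ≤ p.2.length) (h : d.get? s = none) :
    (l.foldl (fun d p => pvAddPair d p.2) d).get? s = get_pair_stop l s := by
  induction l generalizing d with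
  | nil => exact h
  | cons p rest ih =>
    obtain ⟨k, v⟩ := p
    have hlen : 2 ≤ v.length := hpre (k, v) (List.mem_cons_self ..)
    have h0 : PySem.List.pyGet? v 0 = some (v[0]'(by omega)) :=
      PySem.List.pyGet?_ofNat v 0 (by omega)
    have h1 : PySem.List.pyGet? v 1 = some (v[1]'(by omega)) :=
      PySem.List.pyGet?_ofNat v 1 (by omega)
    set a := v[0]'(by omega) with ha
    set b := v[1]'(by omega) with hb
    rw [show (List.foldl (fun d p => pvAddPair d p.2) d ((k, v) :: rest)) = List.foldl (fun d p => pvAddPair d p.2) (pvAddPair d v) rest from rfl]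
    have hadd : pvAddPair d v = pvSetdefault (pvSetdefault d a b) b a := by
      unfold pvAddPair; rw [h0, h1]
    unfold get_pair_stop
    rw [h0, h1]
    by_cases has : a = s
    · subst has
      have hd1 : (pvSetdefault d a b).get? a = some b := pvSetdefault_hit d a b h
      have : (pvAddPair d v).get? a = some b := by
        rw [hadd]; exact pvSetdefault_some _ _ hd1
      rw [pvBuild_some rest _ this]
      simp
    · by_cases hbs : b = s
      · subst hbs
        have hd1 : (pvSetdefault d a b).get? b = none := by
          rw [pvSetdefault_ne d b (Ne.symm has)]; exact h
        have hd2 : (pvAddPair d v).get? b = some a := by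
          rw [hadd]; exact pvSetdefault_hit _ b a hd1
        rw [pvBuild_some rest _ hd2]
        simp [fun hh : a = b => has hh]
      · have hd2 : (pvAddPair d v).get? s = none := by
          rw [hadd, pvSetdefault_ne _ a (Ne.symm hbs),
              pvSetdefault_ne _ b (Ne.symm has)]
          exact h
        rw [ih _ (fun p hp => hpre p (List.mem_cons_of_mem _ hp)) hd2]
        rw [if_neg (fun hh => has (Option.some.inj hh)),
            if_neg (fun hh => hbs (Option.some.inj hh))]

theorem pvGetPairStop_alt_eq (g : List (Int × List Int)) (s : Int)
    (hpre : ∀ p ∈ g, 2 ≤ p.2.length) :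
    get_pair_stop_alt g s = get_pair_stop g s := by
  unfold get_pair_stop_alt
  exact pvBuild_eq_scan s g PySem.Dict.empty hpre (PySem.Dict.get?_empty s)

-- ===== VERDICT (by name: the statement is the Claim_ definition above) =====
theorem get_pair_stop_spec : Claim_equal_get_pair_stop := by
  intro g s _ hpre
  unfold Spec_get_pair_stop
  exact (pvGetPairStop_alt_eq g s hpre).symm
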